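-- pv_equiv track=rewrite | github.com/rreichel3/US-Stock-Symbols | script/fetch_tickers_by_exchange.py | filter_by_exchange
-- ===== SOURCE A (Python) =====
-- from typing import Dict, List, Set
--
-- def filter_by_exchange(stocks: List[Dict]) -> Dict[str, List[Dict]]:
--     """Filter stocks by exchange"""
--     exchanges = {
--         'nasdaq': [],
--         'nyse': [],
--         'amex': []
--     }
--
--     for stock in stocks:
--         exchange = stock.get('exchange', '').upper().strip()
--         symbol = stock.get('symbol', '').strip()
--
--         # Skip if no symbol or exchange
--         if not symbol or not exchange:
--             continue
--
--         # Skip delisted, ETFs, and other non-equity securities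
--         asset_type = stock.get('assetType', '').upper()
--         if asset_type not in ['STOCK', 'EQUITY', ''] and 'EQUITY' not in asset_type:
--             continue
--
--         # Filter by exchange
--         if exchange in ['NASDAQ', 'NASDAQ GLOBAL MARKET', 'NASDAQ CAPITAL MARKET', 'NASDAQ GLOBAL SELECT']:
--             exchanges['nasdaq'].append(stock)
--         elif exchange in ['NYSE', 'NEW YORK STOCK EXCHANGE']:
--             exchanges['nyse'].append(stock)
--         elif exchange in ['AMEX', 'NYSE AMERICAN', 'AMERICAN STOCK EXCHANGE']:
--             exchanges['amex'].append(stock)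
--
--     # Sort each exchange by symbol
--     for exchange in exchanges:
--         exchanges[exchange].sort(key=lambda x: x.get('symbol', ''))
--
--     return exchanges
-- ===== SOURCE B (Python) =====
-- _EXCHANGE_MAP = {
--     'NASDAQ': 'nasdaq', 'NASDAQ GLOBAL MARKET': 'nasdaq',
--     'NASDAQ CAPITAL MARKET': 'nasdaq', 'NASDAQ GLOBAL SELECT': 'nasdaq',
--     'NYSE': 'nyse', 'NEW YORK STOCK EXCHANGE': 'nyse',
--     'AMEX': 'amex', 'NYSE AMERICAN': 'amex', 'AMERICAN STOCK EXCHANGE': 'amex',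
-- }
--
--
-- def _keep(stock):
--     # equity-ish securities with a non-blank symbol
--     if not stock.get('symbol', '').strip():
--         return False
--     asset_type = stock.get('assetType', '').upper()
--     return asset_type in ('STOCK', 'EQUITY', '') or 'EQUITY' in asset_type
--
--
-- def _bucket(stock):
--     # '' (and anything unknown) maps to None, so the blank-exchange check is subsumed
--     return _EXCHANGE_MAP.get(stock.get('exchange', '').upper().strip())
--
--
-- def filter_by_exchange(stocks):
--     """Filter stocks by exchange"""
--     kept = sorted((s for s in stocks if _keep(s)), key=lambda x: x.get('symbol', ''))
--     return {name: [s for s in kept if _bucket(s) == name]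
--             for name in ('nasdaq', 'nyse', 'amex')}
-- ===== Notes on version B (the rewrite author's own statement) =====
-- stated objective: alternative
-- what changed: B replaces A's append-into-three-buckets loop with if/elif membership chains plus a per-bucket sort by: one stable sort of the keep-filtered input, a module-level exchange-name-to-bucket lookup table instead of the membership chains, and three comprehension passes that select each bucket from the single sorted list.
import Mathlib
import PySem

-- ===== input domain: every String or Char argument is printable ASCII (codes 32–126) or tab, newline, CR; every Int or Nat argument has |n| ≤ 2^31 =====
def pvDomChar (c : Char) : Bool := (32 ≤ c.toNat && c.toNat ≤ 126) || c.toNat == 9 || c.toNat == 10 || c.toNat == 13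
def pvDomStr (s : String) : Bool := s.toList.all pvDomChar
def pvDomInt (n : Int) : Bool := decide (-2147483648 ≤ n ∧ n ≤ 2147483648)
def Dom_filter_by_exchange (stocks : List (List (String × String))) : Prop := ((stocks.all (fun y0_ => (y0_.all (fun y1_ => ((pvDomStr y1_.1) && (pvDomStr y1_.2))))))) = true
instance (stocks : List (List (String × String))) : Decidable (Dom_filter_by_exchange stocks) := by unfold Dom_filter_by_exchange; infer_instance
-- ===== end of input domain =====

-- B replaces A's bucket-appending loop + per-bucket sorts by one sort of the keep-filtered
-- input and three comprehension passes driven by an exchange-name → bucket lookup table;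
-- same return value, objective: alternative decomposition.

-- ===== PORT A =====
-- the body of A's 'for stock in stocks' loop (appends the stock to the right bucket of the dict)
def pvStepA (d : PySem.Dict String (List (List (String × String)))) (stock : List (String × String)) :
    PySem.Dict String (List (List (String × String))) :=
  let exchange := PySem.Str.strip (PySem.Str.upper ((PySem.Dict.mk stock).getD "exchange" ""))
  let symbol := PySem.Str.strip ((PySem.Dict.mk stock).getD "symbol" "")
  if symbol = "" || exchange = "" then d
  else
    let assetType := PySem.Str.upper ((PySem.Dict.mk stock).getD "assetType" "")
    if !(["STOCK", "EQUITY", ""].contains assetType) && !(PySem.Str.isIn "EQUITY" assetType) then d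
    else if ["NASDAQ", "NASDAQ GLOBAL MARKET", "NASDAQ CAPITAL MARKET", "NASDAQ GLOBAL SELECT"].contains exchange then
      d.modify "nasdaq" [] (· ++ [stock])
    else if ["NYSE", "NEW YORK STOCK EXCHANGE"].contains exchange then
      d.modify "nyse" [] (· ++ [stock])
    else if ["AMEX", "NYSE AMERICAN", "AMERICAN STOCK EXCHANGE"].contains exchange then
      d.modify "amex" [] (· ++ [stock])
    else d

def filter_by_exchange (stocks : List (List (String × String))) : List (String × List (List (String × String))) :=
  let exchanges : PySem.Dict String (List (List (String × String))) :=
    PySem.Dict.mk [("nasdaq", []), ("nyse", []), ("amex", [])]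
  let exchanges := stocks.foldl pvStepA exchanges
  -- 'for exchange in exchanges: exchanges[exchange].sort(key=lambda x: x.get('symbol', ''))'
  let exchanges := exchanges.keys.foldl
    (fun d k => d.modify k [] (fun v => PySem.List.sorted v (fun x => (PySem.Dict.mk x).getD "symbol" ""))) exchanges
  exchanges.items

-- ===== PORT B =====
-- Source B's module-level table _EXCHANGE_MAP
def pvExchangeMap : PySem.Dict String String :=
  PySem.Dict.ofList
    [("NASDAQ", "nasdaq"), ("NASDAQ GLOBAL MARKET", "nasdaq"),
     ("NASDAQ CAPITAL MARKET", "nasdaq"), ("NASDAQ GLOBAL SELECT", "nasdaq"),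
     ("NYSE", "nyse"), ("NEW YORK STOCK EXCHANGE", "nyse"),
     ("AMEX", "amex"), ("NYSE AMERICAN", "amex"), ("AMERICAN STOCK EXCHANGE", "amex")]

-- Source B's helper _keep
def pvKeep (stock : List (String × String)) : Bool :=
  if PySem.Str.strip ((PySem.Dict.mk stock).getD "symbol" "") = "" then false
  else
    let assetType := PySem.Str.upper ((PySem.Dict.mk stock).getD "assetType" "")
    ["STOCK", "EQUITY", ""].contains assetType || PySem.Str.isIn "EQUITY" assetType

-- Source B's helper _bucket
def pvBucket (stock : List (String × String)) : Option String :=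
  pvExchangeMap.get? (PySem.Str.strip (PySem.Str.upper ((PySem.Dict.mk stock).getD "exchange" "")))

def filter_by_exchange_alt (stocks : List (List (String × String))) : List (String × List (List (String × String))) :=
  let kept := PySem.List.sorted (stocks.filter pvKeep) (fun x => (PySem.Dict.mk x).getD "symbol" "")
  ["nasdaq", "nyse", "amex"].map (fun name => (name, kept.filter (fun s => pvBucket s == some name)))

-- ===== PRECONDITION & SPEC =====
def Spec_filter_by_exchange (stocks : List (List (String × String))) (out : List (String × List (List (String × String)))) : Prop := out = filter_by_exchange_alt stocks
instance (stocks : List (List (String × String))) (out : List (String × List (List (String × String)))) : Decidable (Spec_filter_by_exchange stocks out) := by unfold Spec_filter_by_exchange; infer_instance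

-- ===== CLAIM (what is proved, stated in full; the proofs are below) =====
def Claim_equal_filter_by_exchange : Prop := ∀ (stocks : List (List (String × String))), Dom_filter_by_exchange stocks → Spec_filter_by_exchange stocks (filter_by_exchange stocks)

-- ===== LEMMAS AND PROOFS =====

-- the three bucket predicates, expressed through Source B's helpers
def pvIsN (s : List (String × String)) : Bool := pvKeep s && (pvBucket s == some "nasdaq")
def pvIsY (s : List (String × String)) : Bool := pvKeep s && (pvBucket s == some "nyse")
def pvIsM (s : List (String × String)) : Bool := pvKeep s && (pvBucket s == some "amex")

-- lookup-table facts: what pvExchangeMap returns on each branch of A's if/elif chain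
theorem pv_map_nasdaq (e : String)
    (h : (["NASDAQ", "NASDAQ GLOBAL MARKET", "NASDAQ CAPITAL MARKET", "NASDAQ GLOBAL SELECT"].contains e) = true) :
    pvExchangeMap.get? e = some "nasdaq" := by
  simp only [List.contains_eq_mem, decide_eq_true_eq, List.mem_cons, List.not_mem_nil, or_false] at h
  rcases h with h | h | h | h <;> subst h <;> rfl

theorem pv_map_nyse (e : String)
    (h : (["NYSE", "NEW YORK STOCK EXCHANGE"].contains e) = true) :
    pvExchangeMap.get? e = some "nyse" := by
  simp only [List.contains_eq_mem, decide_eq_true_eq, List.mem_cons, List.not_mem_nil, or_false] at h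
  rcases h with h | h <;> subst h <;> rfl

theorem pv_map_amex (e : String)
    (h : (["AMEX", "NYSE AMERICAN", "AMERICAN STOCK EXCHANGE"].contains e) = true) :
    pvExchangeMap.get? e = some "amex" := by
  simp only [List.contains_eq_mem, decide_eq_true_eq, List.mem_cons, List.not_mem_nil, or_false] at h
  rcases h with h | h | h <;> subst h <;> rfl

theorem pv_map_none (e : String)
    (h1 : ¬ (["NASDAQ", "NASDAQ GLOBAL MARKET", "NASDAQ CAPITAL MARKET", "NASDAQ GLOBAL SELECT"].contains e) = true)
    (h2 : ¬ (["NYSE", "NEW YORK STOCK EXCHANGE"].contains e) = true)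
    (h3 : ¬ (["AMEX", "NYSE AMERICAN", "AMERICAN STOCK EXCHANGE"].contains e) = true) :
    pvExchangeMap.get? e = none := by
  simp only [List.contains_eq_mem, decide_eq_true_eq, List.mem_cons, List.not_mem_nil, or_false] at h1 h2 h3
  push Not at h1 h2 h3
  obtain ⟨a1, a2, a3, a4⟩ := h1; obtain ⟨b1, b2⟩ := h2; obtain ⟨c1, c2, c3⟩ := h3
  rw [show pvExchangeMap = PySem.Dict.mk
    [("NASDAQ", "nasdaq"), ("NASDAQ GLOBAL MARKET", "nasdaq"),
     ("NASDAQ CAPITAL MARKET", "nasdaq"), ("NASDAQ GLOBAL SELECT", "nasdaq"),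
     ("NYSE", "nyse"), ("NEW YORK STOCK EXCHANGE", "nyse"),
     ("AMEX", "amex"), ("NYSE AMERICAN", "amex"), ("AMERICAN STOCK EXCHANGE", "amex")] from rfl]
  simp [PySem.Dict.get?, List.find?,
        beq_eq_false_iff_ne.mpr (Ne.symm a1), beq_eq_false_iff_ne.mpr (Ne.symm a2),
        beq_eq_false_iff_ne.mpr (Ne.symm a3), beq_eq_false_iff_ne.mpr (Ne.symm a4),
        beq_eq_false_iff_ne.mpr (Ne.symm b1), beq_eq_false_iff_ne.mpr (Ne.symm b2),
        beq_eq_false_iff_ne.mpr (Ne.symm c1), beq_eq_false_iff_ne.mpr (Ne.symm c2),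
        beq_eq_false_iff_ne.mpr (Ne.symm c3)]

-- inserting below every element of a list puts the element in front
-- inserting below every element of a list puts the element in front
theorem pv_insertBy_head {α : Type} (before : α → α → Bool) (x : α) (ys : List α)
    (h : ∀ z ∈ ys, before x z = true) :
    PySem.List.insertBy before x ys = x :: ys := by
  cases ys with
  | nil => rfl
  | cons z t => simp [PySem.List.insertBy, h z (by simp)]

-- filtering commutes with a stable insertion into a key-sorted list
theorem pv_filter_insertBy {α κ : Type} [LinearOrder κ] (key : α → κ) (p : α → Bool) (x : α) :
    ∀ acc : List α, acc.Pairwise (fun a b => key a ≤ key b) →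
    (PySem.List.insertBy (fun a b => decide (key a < key b)) x acc).filter p =
      if p x then PySem.List.insertBy (fun a b => decide (key a < key b)) x (acc.filter p)
      else acc.filter p := by
  intro acc
  induction acc with
  | nil =>
    intro _
    by_cases hx : p x = true <;> simp [PySem.List.insertBy, List.filter, hx]
  | cons a t ih =>
    intro hp
    rw [List.pairwise_cons] at hp
    obtain ⟨ha, ht⟩ := hp
    by_cases hlt : key x < key a
    · have hins : PySem.List.insertBy (fun a b => decide (key a < key b)) x (a :: t) = x :: a :: t := by
        simp [PySem.List.insertBy, hlt]
      rw [hins]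
      by_cases hx : p x = true
      · have hfront : ∀ z ∈ (a :: t).filter p, decide (key x < key z) = true := by
          intro z hz
          have hz' := List.mem_of_mem_filter hz
          rcases List.mem_cons.mp hz' with h | h
          · subst h; simpa using hlt
          · have := ha z h; simp; exact lt_of_lt_of_le hlt this
        rw [pv_insertBy_head _ _ _ hfront]
        simp [List.filter_cons, hx]
      · simp only [Bool.not_eq_true] at hx
        simp [List.filter_cons, hx]
    · have hins : PySem.List.insertBy (fun a b => decide (key a < key b)) x (a :: t) =
          a :: PySem.List.insertBy (fun a b => decide (key a < key b)) x t := by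
        simp [PySem.List.insertBy, hlt]
      rw [hins]
      have hrec := ih ht
      by_cases hpa : p a = true
      · simp only [List.filter_cons, hpa, if_pos, hrec]
        by_cases hx : p x = true <;> simp [hx, PySem.List.insertBy, hlt]
      · simp only [Bool.not_eq_true] at hpa
        simp only [List.filter_cons, hpa, Bool.false_eq_true, hrec]
        by_cases hx : p x = true <;> simp [hx]

-- filtering commutes with the stable sort (the heart of the equivalence)
theorem pv_filter_sorted {α κ : Type} [LinearOrder κ] (key : α → κ) (p : α → Bool) (xs : List α) :
    (PySem.List.sorted xs key).filter p = PySem.List.sorted (xs.filter p) key := by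
  induction xs using List.reverseRecOn with
  | nil => simp [PySem.List.sorted_eq_foldl_insertBy]
  | append_singleton ys x ih =>
    rw [PySem.List.sorted_eq_foldl_insertBy (ys ++ [x]), List.foldl_append,
        ← PySem.List.sorted_eq_foldl_insertBy ys]
    simp only [List.foldl_cons, List.foldl_nil]
    rw [pv_filter_insertBy key p x _ (PySem.List.sorted_pairwise ys key), ih]
    by_cases hx : p x = true
    · rw [List.filter_append]
      simp only [List.filter_cons, hx, if_pos, List.filter_nil]
      rw [PySem.List.sorted_eq_foldl_insertBy (ys.filter p ++ [x]), List.foldl_append,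
          ← PySem.List.sorted_eq_foldl_insertBy (ys.filter p)]
      simp
    · simp only [Bool.not_eq_true] at hx
      rw [List.filter_append]
      simp [hx]

-- A's loop body, per stock, on the three-bucket dict, characterised by B's predicates
set_option maxHeartbeats 1000000 in
theorem pv_stepA_eq (a b c : List (List (String × String))) (s : List (String × String)) :
    pvStepA (PySem.Dict.mk [("nasdaq", a), ("nyse", b), ("amex", c)]) s =
    PySem.Dict.mk [("nasdaq", a ++ [s].filter pvIsN),
                   ("nyse", b ++ [s].filter pvIsY),
                   ("amex", c ++ [s].filter pvIsM)] := by
  simp only [pvStepA]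
  split_ifs with h1 h2 h3 h4 h5
  · simp only [Bool.or_eq_true, decide_eq_true_eq] at h1
    rcases h1 with h | h
    · have hk : pvKeep s = false := by simp only [pvKeep]; rw [if_pos h]
      simp [pvIsN, pvIsY, pvIsM, hk]
    · have hb : pvBucket s = none := by unfold pvBucket; rw [h]; rfl
      simp [pvIsN, pvIsY, pvIsM, hb]
  · simp only [Bool.and_eq_true, Bool.not_eq_true'] at h2
    have hk : pvKeep s = false := by
      simp only [pvKeep]; rw [h2.1, h2.2]; simp
    simp [pvIsN, pvIsY, pvIsM, hk]
  · simp only [Bool.or_eq_true, decide_eq_true_eq, not_or] at h1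
    simp only [Bool.and_eq_true, Bool.not_eq_true', not_and_or, Bool.not_eq_false] at h2
    have hk : pvKeep s = true := by
      simp only [pvKeep]; rw [if_neg h1.1]; rcases h2 with h | h <;> rw [h] <;> simp
    have hb : pvBucket s = some "nasdaq" := pv_map_nasdaq _ h3
    simp [pvIsN, pvIsY, pvIsM, hk, hb,
          PySem.Dict.modify, PySem.Dict.insert, PySem.Dict.getD, PySem.Dict.get?, PySem.Dict.contains]
  · simp only [Bool.or_eq_true, decide_eq_true_eq, not_or] at h1
    simp only [Bool.and_eq_true, Bool.not_eq_true', not_and_or, Bool.not_eq_false] at h2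
    have hk : pvKeep s = true := by
      simp only [pvKeep]; rw [if_neg h1.1]; rcases h2 with h | h <;> rw [h] <;> simp
    have hb : pvBucket s = some "nyse" := pv_map_nyse _ h4
    simp [pvIsN, pvIsY, pvIsM, hk, hb,
          PySem.Dict.modify, PySem.Dict.insert, PySem.Dict.getD, PySem.Dict.get?, PySem.Dict.contains]
  · simp only [Bool.or_eq_true, decide_eq_true_eq, not_or] at h1
    simp only [Bool.and_eq_true, Bool.not_eq_true', not_and_or, Bool.not_eq_false] at h2
    have hk : pvKeep s = true := by
      simp only [pvKeep]; rw [if_neg h1.1]; rcases h2 with h | h <;> rw [h] <;> simp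
    have hb : pvBucket s = some "amex" := pv_map_amex _ h5
    simp [pvIsN, pvIsY, pvIsM, hk, hb,
          PySem.Dict.modify, PySem.Dict.insert, PySem.Dict.getD, PySem.Dict.get?, PySem.Dict.contains]
  · have hb : pvBucket s = none := pv_map_none _ h3 h4 h5
    simp [pvIsN, pvIsY, pvIsM, hb]

-- A's fold fills the three buckets with the three filters
theorem pv_fold_buckets (l : List (List (String × String))) :
    ∀ a b c, l.foldl pvStepA (PySem.Dict.mk [("nasdaq", a), ("nyse", b), ("amex", c)]) =
      PySem.Dict.mk [("nasdaq", a ++ l.filter pvIsN), ("nyse", b ++ l.filter pvIsY),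
                     ("amex", c ++ l.filter pvIsM)] := by
  induction l with
  | nil => intro a b c; simp
  | cons s t ih =>
    intro a b c
    rw [List.foldl_cons, pv_stepA_eq, ih]
    by_cases hn : pvIsN s <;> by_cases hy : pvIsY s <;> by_cases hm : pvIsM s <;>
      simp [hn, hy, hm]

-- A's per-key sorting pass on the literal three-bucket dict
theorem pv_post_sort (va vb vc : List (List (String × String))) :
    ((PySem.Dict.mk [("nasdaq", va), ("nyse", vb), ("amex", vc)] : PySem.Dict String (List (List (String × String)))).keys).foldl
      (fun d k => d.modify k [] (fun v => PySem.List.sorted v (fun x => (PySem.Dict.mk x).getD "symbol" "")))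
      (PySem.Dict.mk [("nasdaq", va), ("nyse", vb), ("amex", vc)]) =
    PySem.Dict.mk [("nasdaq", PySem.List.sorted va (fun x => (PySem.Dict.mk x).getD "symbol" "")),
                   ("nyse", PySem.List.sorted vb (fun x => (PySem.Dict.mk x).getD "symbol" "")),
                   ("amex", PySem.List.sorted vc (fun x => (PySem.Dict.mk x).getD "symbol" ""))] := by
  simp [PySem.Dict.keys, PySem.Dict.modify, PySem.Dict.insert, PySem.Dict.getD,
        PySem.Dict.get?, PySem.Dict.contains, List.foldl]

-- ===== VERDICT (by name: the statement is the Claim_ definition above) =====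
theorem filter_by_exchange_spec : Claim_equal_filter_by_exchange := by
  intro stocks _
  unfold Spec_filter_by_exchange
  simp only [filter_by_exchange, filter_by_exchange_alt]
  rw [pv_fold_buckets stocks [] [] []]
  simp only [List.nil_append]
  rw [pv_post_sort]
  simp only [List.map_cons, List.map_nil, List.cons.injEq, Prod.mk.injEq,
             and_true, true_and]
  refine ⟨?_, ?_, ?_⟩
  · have h : (stocks.filter pvKeep).filter (fun s => pvBucket s == some "nasdaq")
        = stocks.filter pvIsN := by
      rw [List.filter_filter]
      exact List.filter_congr (fun s _ => by simp [pvIsN, Bool.and_comm])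
    rw [pv_filter_sorted, h]
  · have h : (stocks.filter pvKeep).filter (fun s => pvBucket s == some "nyse")
        = stocks.filter pvIsY := by
      rw [List.filter_filter]
      exact List.filter_congr (fun s _ => by simp [pvIsY, Bool.and_comm])
    rw [pv_filter_sorted, h]
  · have h : (stocks.filter pvKeep).filter (fun s => pvBucket s == some "amex")
        = stocks.filter pvIsM := by
      rw [List.filter_filter]
      exact List.filter_congr (fun s _ => by simp [pvIsM, Bool.and_comm])
    rw [pv_filter_sorted, h]
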